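-- pv_equiv track=rewrite | github.com/alcalda/advent-of-code | 2024/Day04/part1.py | diagonal_slices
-- ===== SOURCE A (Python) =====
-- def diagonal_slices(matrix):
--     slices = []
--     rows, cols = len(matrix), len(matrix[0])
--     # upper-left to lower-right
--     for k in range(rows + cols - 1):
--         slice_ = []
--         for i in range(max(0, k - cols + 1), min(rows, k + 1)):
--             j = k - i
--             slice_.append(matrix[i][j])
--         slices.append(slice_)
--     # upper-right to lower-left
--     for k in range(rows + cols - 1):
--         slice_ = []
--         for i in range(max(0, k - cols + 1), min(rows, k + 1)):
--             j = cols - 1 - (k - i)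
--             slice_.append(matrix[i][j])
--         slices.append(slice_)
--
--     return slices
-- ===== SOURCE B (Python) =====
-- def diagonal_slices(matrix):
--     rows, cols = len(matrix), len(matrix[0])
--     n = rows + cols - 1
--     main = [[] for _ in range(n)]
--     anti = [[] for _ in range(n)]
--     for i in range(rows):
--         row = matrix[i]
--         for j in range(cols):
--             v = row[j]
--             main[i + j].append(v)
--             anti[i + cols - 1 - j].append(v)
--     return main + anti
-- ===== Notes on version B (the rewrite author's own statement) =====
-- stated objective: alternative
-- what changed: Replaces A's per-diagonal index arithmetic (two k-loops recomputing range bounds per diagonal) with a single row-major pass that buckets each cell into its two diagonals by key i+j and i+cols-1-j, then concatenates the bucket arrays.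
import Mathlib
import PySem

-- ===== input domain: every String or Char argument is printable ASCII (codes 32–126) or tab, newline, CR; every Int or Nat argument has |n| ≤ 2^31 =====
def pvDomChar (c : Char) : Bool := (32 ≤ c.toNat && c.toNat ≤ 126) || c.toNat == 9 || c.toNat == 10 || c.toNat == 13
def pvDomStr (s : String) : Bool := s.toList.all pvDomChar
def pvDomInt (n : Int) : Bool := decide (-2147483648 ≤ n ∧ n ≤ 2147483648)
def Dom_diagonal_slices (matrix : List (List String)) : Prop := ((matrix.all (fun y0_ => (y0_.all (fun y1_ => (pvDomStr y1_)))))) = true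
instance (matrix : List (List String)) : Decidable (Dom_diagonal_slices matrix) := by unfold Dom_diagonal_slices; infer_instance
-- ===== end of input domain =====

-- B replaces A's two per-diagonal k-loops by one row-major bucketing pass (keys i+j and
-- i+cols-1-j); same asymptotic cost, different traversal ("alternative").

-- ===== PORT A =====
-- Python range(max(0, k-cols+1), min(rows, k+1)) over naturals: start = max 0 (k+1-cols)
-- (Nat subtraction truncates exactly where Python's max(0, ·) clamps), length = stop - start.
def diagonal_slices (matrix : List (List String)) : List (List String) :=
  let rows := matrix.length
  let cols := (matrix.headD []).length
  let s1 := (List.range (rows + cols - 1)).foldl (fun acc k =>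
      acc ++ [((List.range' (max 0 (k + 1 - cols)) (min rows (k + 1) - max 0 (k + 1 - cols))).foldl
        (fun sl i => sl ++ [(matrix.getD i []).getD (k - i) ""]) [])]) []
  let s2 := (List.range (rows + cols - 1)).foldl (fun acc k =>
      acc ++ [((List.range' (max 0 (k + 1 - cols)) (min rows (k + 1) - max 0 (k + 1 - cols))).foldl
        (fun sl i => sl ++ [(matrix.getD i []).getD (cols - 1 - (k - i)) ""]) [])]) []
  s1 ++ s2

-- ===== PORT B =====
def diagonal_slices_alt (matrix : List (List String)) : List (List String) :=
  let rows := matrix.length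
  let cols := (matrix.headD []).length
  let n := rows + cols - 1
  let p := (List.range rows).foldl (fun st i =>
      (List.range cols).foldl (fun st j =>
        let v := (matrix.getD i []).getD j ""
        (st.1.set (i + j) (st.1.getD (i + j) [] ++ [v]),
         st.2.set (i + cols - 1 - j) (st.2.getD (i + cols - 1 - j) [] ++ [v]))) st)
      ((List.replicate n [], List.replicate n []) : List (List String) × List (List String))
  p.1 ++ p.2

-- ===== PRECONDITION & SPEC =====
-- Pre_ excludes exactly the inputs where Python A raises IndexError: the empty matrix
-- (len(matrix[0])) and matrices with a row shorter than len(matrix[0]).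
def Pre_diagonal_slices (matrix : List (List String)) : Prop :=
  matrix ≠ [] ∧ ∀ row ∈ matrix, (matrix.headD []).length ≤ row.length
instance (matrix : List (List String)) : Decidable (Pre_diagonal_slices matrix) := by
  unfold Pre_diagonal_slices; infer_instance

def pvWitness_diagonal_slices : List (List String) := [["a", "b"], ["c", "d"]]

def Spec_diagonal_slices (matrix : List (List String)) (out : List (List String)) : Prop := out = diagonal_slices_alt matrix
instance (matrix : List (List String)) (out : List (List String)) : Decidable (Spec_diagonal_slices matrix out) := by unfold Spec_diagonal_slices; infer_instance

-- ===== CLAIM (what is proved, stated in full; the proofs are below) =====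
def Claim_equal_diagonal_slices : Prop := ∀ (matrix : List (List String)), Dom_diagonal_slices matrix → Pre_diagonal_slices matrix → Spec_diagonal_slices matrix (diagonal_slices matrix)

-- ===== LEMMAS AND PROOFS =====

-- the cell reader both ports use
def pvCell (matrix : List (List String)) (i j : Nat) : String := (matrix.getD i []).getD j ""

-- "append one element per iteration" fold is a map
theorem pv_foldl_push {α β : Type} (g : α → β) :
    ∀ (l : List α) (acc : List β), l.foldl (fun s x => s ++ [g x]) acc = acc ++ l.map g := by
  intro l
  induction l with
  | nil => simp
  | cons x xs ih => intro acc; simp [List.foldl, ih]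

theorem pv_foldl_len {α : Type} (n : Nat) (F : List (List String) → α → List (List String)) :
    ∀ (l : List α), (∀ st x, x ∈ l → st.length = n → (F st x).length = n) →
      ∀ st : List (List String), st.length = n → (l.foldl F st).length = n := by
  intro l
  induction l with
  | nil => intro _ st h; simpa using h
  | cons x xs ih =>
      intro hF st hst
      exact ih (fun st y hy h => hF st y (List.mem_cons_of_mem _ hy) h)
        (F st x) (hF st x (List.mem_cons_self) hst)

-- generic bucket-fold lemma: if each step appends c x t to bucket t (length-preservingly),
-- the final bucket t is the initial one followed by all contributions in order
theorem pv_foldl_getD {α : Type} (n : Nat) (F : List (List String) → α → List (List String))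
    (c : α → Nat → List String) :
    ∀ (l : List α),
      (∀ st x, x ∈ l → st.length = n → (F st x).length = n) →
      (∀ st x t, x ∈ l → st.length = n → (F st x).getD t [] = st.getD t [] ++ c x t) →
      ∀ st : List (List String), st.length = n → ∀ t,
        (l.foldl F st).getD t [] = st.getD t [] ++ l.flatMap (fun x => c x t) := by
  intro l
  induction l with
  | nil => intro _ _ st _ t; simp
  | cons x xs ih =>
      intro hlen hget st hst t
      have h1 : (F st x).length = n := hlen st x (List.mem_cons_self) hst
      have h2 := ih (fun st y hy h => hlen st y (List.mem_cons_of_mem _ hy) h)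
        (fun st y t hy h => hget st y t (List.mem_cons_of_mem _ hy) h) (F st x) h1 t
      simp only [List.foldl_cons, List.flatMap_cons]
      rw [h2, hget st x t (List.mem_cons_self) hst, List.append_assoc]

-- effect of one set-append step on a bucket
theorem pv_set_getD (st : List (List String)) (k t : Nat) (v : List String) (hk : k < st.length) :
    (st.set k (st.getD k [] ++ v)).getD t [] = st.getD t [] ++ (if k = t then v else []) := by
  by_cases h : k = t
  · subst h
    simp [List.getD_eq_getElem?_getD, hk]
  · simp [List.getD_eq_getElem?_getD, h]

-- flatMap of a pointwise-equal family over range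
theorem pv_flatMap_congr {β : Type} (g g' : Nat → List β) :
    ∀ n, (∀ j, j < n → g j = g' j) → (List.range n).flatMap g = (List.range n).flatMap g' := by
  intro n
  induction n with
  | zero => intro _; simp
  | succ m ih =>
      intro h
      simp [List.range_succ, ih (fun j hj => h j (Nat.lt_succ_of_lt hj)), h m (Nat.lt_succ_self m)]

theorem pv_flatMap_single {β : Type} (m : Nat) (v : List β) :
    ∀ n, (List.range n).flatMap (fun j => if j = m then v else []) = if m < n then v else [] := by
  intro n
  induction n with
  | zero => simp
  | succ k ih =>
      simp only [List.range_succ, List.flatMap_append, List.flatMap_cons, List.flatMap_nil,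
        List.append_nil, ih]
      split_ifs with h1 h2 h3 h4 <;> simp_all <;> omega

theorem pv_flatMap_if_filter {α β : Type} (p : α → Prop) [DecidablePred p] (g : α → β) :
    ∀ (l : List α), l.flatMap (fun x => if p x then [g x] else []) = (l.filter (fun x => decide (p x))).map g := by
  intro l
  induction l with
  | nil => simp
  | cons x xs ih =>
      by_cases h : p x <;> simp [h, ih]

theorem pv_filter_range_interval (a c : Nat) :
    ∀ n, (List.range n).filter (fun i => decide (a ≤ i ∧ i < c)) = List.range' a (min n c - a) := by
  intro n
  induction n with
  | zero => simp
  | succ m ih =>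
      simp only [List.range_succ, List.filter_append, ih, List.filter_cons, List.filter_nil]
      by_cases h : a ≤ m ∧ m < c
      · have h1 : min m c = m := by omega
        have h2 : min (m + 1) c = m + 1 := by omega
        have h3 : m - a + 1 = m + 1 - a := by omega
        have h4 : a + (m - a) = m := by omega
        rw [h1, h2, ← h3, List.range'_1_concat, h4]
        simp [h]
      · have h1 : min (m + 1) c - a = min m c - a := by omega
        simp [h, h1]

-- contribution of row i to main bucket t
theorem pv_main_contrib (matrix : List (List String)) (cols i t : Nat) :
    (List.range cols).flatMap (fun j => if i + j = t then [pvCell matrix i j] else []) =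
      if i ≤ t ∧ t < i + cols then [pvCell matrix i (t - i)] else [] := by
  by_cases h : i ≤ t ∧ t < i + cols
  · rw [pv_flatMap_congr _ (fun j => if j = t - i then [pvCell matrix i (t - i)] else []) cols
      (by intro j hj
          by_cases hji : j = t - i
          · subst hji
            have ht : i + (t - i) = t := by omega
            simp [ht]
          · have : ¬ (i + j = t) := by omega
            simp [this, hji])]
    rw [pv_flatMap_single]
    have : t - i < cols := by omega
    simp [h, this]
  · rw [pv_flatMap_congr _ (fun _ => []) cols
      (by intro j hj
          have : ¬ (i + j = t) := by omega
          simp [this])]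
    simp [h]

-- contribution of row i to anti bucket t
theorem pv_anti_contrib (matrix : List (List String)) (cols i t : Nat) :
    (List.range cols).flatMap (fun j => if i + cols - 1 - j = t then [pvCell matrix i j] else []) =
      if i ≤ t ∧ t < i + cols then [pvCell matrix i (cols - 1 - (t - i))] else [] := by
  by_cases h : i ≤ t ∧ t < i + cols
  · rw [pv_flatMap_congr _ (fun j => if j = i + cols - 1 - t then [pvCell matrix i (cols - 1 - (t - i))] else []) cols
      (by intro j hj
          by_cases hji : j = i + cols - 1 - t
          · subst hji
            have h2 : i + cols - 1 - t = cols - 1 - (t - i) := by omega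
            have h1 : i + cols - 1 - (cols - 1 - (t - i)) = t := by omega
            simp [h2, h1]
          · have : ¬ (i + cols - 1 - j = t) := by omega
            simp [this, hji])]
    rw [pv_flatMap_single]
    have : i + cols - 1 - t < cols := by omega
    simp [h, this]
  · rw [pv_flatMap_congr _ (fun _ => []) cols
      (by intro j hj
          have : ¬ (i + cols - 1 - j = t) := by omega
          simp [this])]
    simp [h]

-- the flatMap-of-contributions equals A's inner slice (main direction)
theorem pv_rows_main (matrix : List (List String)) (rows cols t : Nat) :
    (List.range rows).flatMap (fun i => if i ≤ t ∧ t < i + cols then [pvCell matrix i (t - i)] else []) =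
      (List.range' (max 0 (t + 1 - cols)) (min rows (t + 1) - max 0 (t + 1 - cols))).map
        (fun i => pvCell matrix i (t - i)) := by
  rw [pv_flatMap_if_filter (fun i => i ≤ t ∧ t < i + cols)]
  have : (List.range rows).filter (fun i => decide (i ≤ t ∧ t < i + cols)) =
      (List.range rows).filter (fun i => decide (t + 1 - cols ≤ i ∧ i < t + 1)) := by
    apply List.filter_congr
    intro i _
    simp only [decide_eq_decide]
    omega
  rw [this, pv_filter_range_interval]
  simp

theorem pv_rows_anti (matrix : List (List String)) (rows cols t : Nat) :
    (List.range rows).flatMap (fun i => if i ≤ t ∧ t < i + cols then [pvCell matrix i (cols - 1 - (t - i))] else []) =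
      (List.range' (max 0 (t + 1 - cols)) (min rows (t + 1) - max 0 (t + 1 - cols))).map
        (fun i => pvCell matrix i (cols - 1 - (t - i))) := by
  rw [pv_flatMap_if_filter (fun i => i ≤ t ∧ t < i + cols)]
  have : (List.range rows).filter (fun i => decide (i ≤ t ∧ t < i + cols)) =
      (List.range rows).filter (fun i => decide (t + 1 - cols ≤ i ∧ i < t + 1)) := by
    apply List.filter_congr
    intro i _
    simp only [decide_eq_decide]
    omega
  rw [this, pv_filter_range_interval]
  simp

theorem pv_replicate_getD (n t : Nat) : (List.replicate n ([] : List String)).getD t [] = [] := by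
  simp [List.getD_eq_getElem?_getD, List.getElem?_replicate]
  split <;> simp

-- a fold over independent pair components splits, stated for B's concrete step
theorem pv_pair_split_inner (matrix : List (List String)) (cols i : Nat) :
    ∀ (l : List Nat) (a b : List (List String)),
      l.foldl (fun st j =>
          ((st.1.set (i + j) (st.1.getD (i + j) [] ++ [(matrix.getD i []).getD j ""]) : List (List String)),
           (st.2.set (i + cols - 1 - j) (st.2.getD (i + cols - 1 - j) [] ++ [(matrix.getD i []).getD j ""]) : List (List String)))) (a, b)
      = (l.foldl (fun s j => s.set (i + j) (s.getD (i + j) [] ++ [pvCell matrix i j])) a,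
         l.foldl (fun s j => s.set (i + cols - 1 - j) (s.getD (i + cols - 1 - j) [] ++ [pvCell matrix i j])) b) := by
  intro l
  induction l with
  | nil => intro a b; rfl
  | cons x xs ih =>
      intro a b
      simp only [List.foldl_cons]
      exact ih _ _

theorem pv_pair_split (matrix : List (List String)) (cols : Nat) :
    ∀ (l : List Nat) (a b : List (List String)),
      l.foldl (fun st i => (List.range cols).foldl (fun st j =>
          ((st.1.set (i + j) (st.1.getD (i + j) [] ++ [(matrix.getD i []).getD j ""]) : List (List String)),
           (st.2.set (i + cols - 1 - j) (st.2.getD (i + cols - 1 - j) [] ++ [(matrix.getD i []).getD j ""]) : List (List String)))) st) (a, b)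
      = (l.foldl (fun st i => (List.range cols).foldl
            (fun s j => s.set (i + j) (s.getD (i + j) [] ++ [pvCell matrix i j])) st) a,
         l.foldl (fun st i => (List.range cols).foldl
            (fun s j => s.set (i + cols - 1 - j) (s.getD (i + cols - 1 - j) [] ++ [pvCell matrix i j])) st) b) := by
  intro l
  induction l with
  | nil => intro a b; rfl
  | cons x xs ih =>
      intro a b
      simp only [List.foldl_cons]
      rw [pv_pair_split_inner]
      exact ih _ _

-- a double bucket fold writes, into bucket t, exactly the cells whose key is t, in row-major order
theorem pv_double (matrix : List (List String)) (rows cols : Nat) (key : Nat → Nat → Nat)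
    (hkey : ∀ i j, i < rows → j < cols → key i j < rows + cols - 1) :
    (List.range rows).foldl (fun st i => (List.range cols).foldl
        (fun st j => st.set (key i j) (st.getD (key i j) [] ++ [pvCell matrix i j])) st)
      (List.replicate (rows + cols - 1) []) =
    (List.range (rows + cols - 1)).map (fun t => (List.range rows).flatMap (fun i =>
        (List.range cols).flatMap (fun j => if key i j = t then [pvCell matrix i j] else []))) := by
  have hlenF : ∀ (st : List (List String)) (i : Nat), i ∈ List.range rows → st.length = rows + cols - 1 →
      ((List.range cols).foldl
        (fun st j => st.set (key i j) (st.getD (key i j) [] ++ [pvCell matrix i j])) st).length = rows + cols - 1 := by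
    intro st i _ hst
    exact pv_foldl_len _ _ (List.range cols) (fun st' j _ h => by simpa [List.length_set] using h) st hst
  have hgetF : ∀ (st : List (List String)) (i t : Nat), i ∈ List.range rows → st.length = rows + cols - 1 →
      ((List.range cols).foldl
        (fun st j => st.set (key i j) (st.getD (key i j) [] ++ [pvCell matrix i j])) st).getD t [] =
        st.getD t [] ++ (List.range cols).flatMap (fun j => if key i j = t then [pvCell matrix i j] else []) := by
    intro st i t hi hst
    refine pv_foldl_getD _ _ (fun j t => if key i j = t then [pvCell matrix i j] else []) (List.range cols)
      (fun st' j _ h => by simpa [List.length_set] using h) ?_ st hst t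
    intro st' j t' hj h
    have hkb : key i j < st'.length := by
      rw [h]; exact hkey i j (List.mem_range.mp hi) (List.mem_range.mp hj)
    exact pv_set_getD st' (key i j) t' [pvCell matrix i j] hkb
  have hlen := pv_foldl_len (rows + cols - 1) _ (List.range rows) hlenF
    (List.replicate (rows + cols - 1) []) (by simp)
  apply List.ext_getElem (by simp only [List.length_map, List.length_range]; exact hlen)
  intro t h1 h2
  have ht : t < rows + cols - 1 := by rw [hlen] at h1; exact h1
  have h3 := pv_foldl_getD (rows + cols - 1) _ _ (List.range rows) hlenF hgetF
    (List.replicate (rows + cols - 1) []) (by simp) t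
  rw [pv_replicate_getD, List.nil_append] at h3
  rw [List.getD_eq_getElem _ _ h1] at h3
  rw [h3, List.getElem_map, List.getElem_range]

-- ===== VERDICT (by name: the statement is the Claim_ definition above) =====
theorem diagonal_slices_spec : Claim_equal_diagonal_slices := by
  intro matrix _ _
  show diagonal_slices matrix = diagonal_slices_alt matrix
  have hpair : diagonal_slices_alt matrix =
      ((List.range matrix.length).foldl (fun st i => (List.range (matrix.headD []).length).foldl
          (fun s j => s.set (i + j) (s.getD (i + j) [] ++ [pvCell matrix i j])) st)
        (List.replicate (matrix.length + (matrix.headD []).length - 1) [])) ++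
      ((List.range matrix.length).foldl (fun st i => (List.range (matrix.headD []).length).foldl
          (fun s j => s.set (i + (matrix.headD []).length - 1 - j)
            (s.getD (i + (matrix.headD []).length - 1 - j) [] ++ [pvCell matrix i j])) st)
        (List.replicate (matrix.length + (matrix.headD []).length - 1) [])) := by
    show (_ : List (List String) × List (List String)).1 ++ _ = _
    rw [pv_pair_split]
  rw [hpair,
    pv_double matrix matrix.length (matrix.headD []).length (fun i j => i + j)
      (by intro i j hi hj; show i + j < _; omega),
    pv_double matrix matrix.length (matrix.headD []).length
      (fun i j => i + (matrix.headD []).length - 1 - j)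
      (by intro i j hi hj; show i + (matrix.headD []).length - 1 - j < _; omega)]
  simp only [pv_main_contrib, pv_anti_contrib, pv_rows_main, pv_rows_anti]
  simp only [diagonal_slices, pv_foldl_push, List.nil_append, pvCell]
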